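-- pv_equiv track=rewrite | github.com/glassyys/yys_test01 | py_src/쿼리추출/sql_lng_005_with_t02.py | compute_cte_depths
-- ===== SOURCE A (Python) =====
-- def compute_cte_depths(cte_map):
--     """
--     CTE 의존 관계 분석으로 각 CTE의 depth 산출.
--       물리테이블만 참조     -> depth 1
--       다른 CTE 참조 있으면 -> max(참조CTE depth) + 1
--     Returns: { 'CTE명(대문자)': depth(int) }
--     """
--     cte_names = set(cte_map.keys())
--     depth_map = {}
--
--     def get_depth(cte_name, visiting=None):
--         if cte_name in depth_map:
--             return depth_map[cte_name]
--         if visiting is None: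
--             visiting = set()
--         if cte_name in visiting:
--             return 1                    # 순환 참조 방지
--         visiting.add(cte_name)
--         srcs     = cte_map.get(cte_name, set())
--         cte_deps = [s.upper() for s in srcs if s and s.upper() in cte_names]
--         if not cte_deps:
--             depth_map[cte_name] = 1
--         else:
--             depth_map[cte_name] = max(get_depth(d, visiting) for d in cte_deps) + 1
--         return depth_map[cte_name]
--
--     for cte_name in cte_map:
--         get_depth(cte_name)
--     return depth_map
-- ===== SOURCE B (Python) =====
-- def compute_cte_depths(cte_map):
--     """Iterative (explicit-stack) version: same depths, no recursion."""
--     cte_names = set(cte_map.keys())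
--     depth_map = {}
--     for root in cte_map:
--         visiting = set()
--         stack = [("eval", root, None, None)]
--         ret = None
--         while stack:
--             tag, name, rest, acc = stack.pop()
--             if tag == "eval":
--                 if name in depth_map:
--                     ret = depth_map[name]
--                 elif name in visiting:
--                     ret = 1
--                 else:
--                     visiting.add(name)
--                     deps = [s.upper() for s in cte_map.get(name, [])
--                             if s and s.upper() in cte_names]
--                     if not deps:
--                         depth_map[name] = 1
--                         ret = 1
--                     else:
--                         stack.append(("comb", name, deps[1:], None))
--                         stack.append(("eval", deps[0], None, None))
--             else:
--                 acc = ret if acc is None else max(acc, ret)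
--                 if rest:
--                     stack.append(("comb", name, rest[1:], acc))
--                     stack.append(("eval", rest[0], None, None))
--                 else:
--                     depth_map[name] = acc + 1
--                     ret = acc + 1
--     return depth_map
-- ===== Notes on version B (the rewrite author's own statement) =====
-- stated objective: alternative
-- what changed: Replaced the recursive memoized get_depth with an explicit-stack (defunctionalized) iterative DFS using two frame kinds (expand node / combine child maxima), keeping the shared depth_map, per-root visiting set and the exact cycle rule (return 1 uncached).
import Mathlib
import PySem

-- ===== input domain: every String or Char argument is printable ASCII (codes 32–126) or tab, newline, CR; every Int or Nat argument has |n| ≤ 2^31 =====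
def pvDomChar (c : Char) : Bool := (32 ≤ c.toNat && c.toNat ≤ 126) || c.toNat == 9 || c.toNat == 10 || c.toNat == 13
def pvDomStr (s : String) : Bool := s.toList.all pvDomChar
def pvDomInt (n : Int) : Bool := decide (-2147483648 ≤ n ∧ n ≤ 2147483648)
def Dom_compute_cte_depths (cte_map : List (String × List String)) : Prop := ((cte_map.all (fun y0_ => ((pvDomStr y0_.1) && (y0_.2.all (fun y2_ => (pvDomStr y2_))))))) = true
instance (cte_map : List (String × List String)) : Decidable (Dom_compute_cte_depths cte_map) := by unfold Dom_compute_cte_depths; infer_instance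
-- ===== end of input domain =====

-- B replaces A's recursive memoized DFS by an explicit-stack (defunctionalized) iterative DFS
-- with the same depths, shared depth_map, per-root visiting set and cycle rule (objective: alternative).

-- ===== PORT A =====
-- helpers modelling the Python data: cte_map as a dict, set(cte_map.keys()),
-- and the dep list [s.upper() for s in srcs if s and s.upper() in cte_names]
def cteDict (cte_map : List (String × List String)) : PySem.Dict String (List String) :=
  PySem.Dict.ofList cte_map

def cteNames (cte_map : List (String × List String)) : PySem.Set String :=
  PySem.Set.ofList (cteDict cte_map).keys

def depsOf (cte_map : List (String × List String)) (n : String) : List String :=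
  (((cteDict cte_map).getD n []).filter
      (fun s => s != "" && PySem.Set.contains (cteNames cte_map) (PySem.Str.upper s))).map
    PySem.Str.upper

-- A's get_depth: recursion with the shared depth_map and the (mutated, shared) visiting set,
-- both threaded as state; fuel is a pure totality guard (recursion depth is bounded by the
-- number of keys, so fuel (size+1) is never exhausted).
mutual
def getDepthA (cte_map : List (String × List String)) :
    Nat → String → PySem.Dict String Int × PySem.Set String →
    Int × PySem.Dict String Int × PySem.Set String
  | 0, _, st => (1, st)
  | Nat.succ f, n, (dm, vis) =>
    match dm.get? n with
    | some v => (v, dm, vis)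
    | none =>
      if PySem.Set.contains vis n then (1, dm, vis)
      else
        let vis1 := PySem.Set.add vis n
        match depsOf cte_map n with
        | [] => (1, dm.insert n 1, vis1)
        | d0 :: rest =>
          let r := goDepsA cte_map f rest (getDepthA cte_map f d0 (dm, vis1))
          (r.1 + 1, r.2.1.insert n (r.1 + 1), r.2.2)
termination_by f _ _ => (f, 0)

-- max(get_depth(d, visiting) for d in cte_deps): left-to-right, threading the state
def goDepsA (cte_map : List (String × List String)) :
    Nat → List String → Int × PySem.Dict String Int × PySem.Set String →
    Int × PySem.Dict String Int × PySem.Set String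
  | _, [], p => p
  | f, d :: rest, p =>
    let q := getDepthA cte_map f d p.2
    goDepsA cte_map f rest (max p.1 q.1, q.2)
termination_by f l _ => (f, l.length + 1)
end

def compute_cte_depths (cte_map : List (String × List String)) : List (String × Int) :=
  ((cteDict cte_map).keys.foldl
      (fun dm n =>
        (getDepthA cte_map ((cteDict cte_map).size + 1) n (dm, PySem.Set.empty)).2.1)
      PySem.Dict.empty).items

-- ===== PORT B =====
-- B: explicit stack of frames; eval n = enter get-depth of n, comb n rest acc = combine
-- child results for n (rest = deps still to do, acc = running max so far, none = no child yet)
inductive BFrame where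
  | eval : String → BFrame
  | comb : String → List String → Option Int → BFrame
deriving DecidableEq, Repr

-- termination measure helpers for runB (number of keys not yet in visiting, stack weight)
def keysNot (cte_map : List (String × List String)) (vis : PySem.Set String) : Nat :=
  ((cteDict cte_map).keys.filter (fun x => !(PySem.Set.contains vis x))).length

def frameW : BFrame → Nat
  | .eval _ => 1
  | .comb _ rest _ => 2 * rest.length + 2

def stackW (k : List BFrame) : Nat := (k.map frameW).sum

lemma contains_add_of {vis : PySem.Set String} {n x : String}
    (h : PySem.Set.contains vis x = true) :
    PySem.Set.contains (PySem.Set.add vis n) x = true := by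
  simp only [PySem.Set.add]
  split
  · exact h
  · simp only [PySem.Set.contains] at *
    simp only [List.contains_append]
    have : x ∈ vis := by simpa using h
    simp [this]

lemma keysNot_add_le (cte_map : List (String × List String)) (vis : PySem.Set String)
    (n : String) : keysNot cte_map (PySem.Set.add vis n) ≤ keysNot cte_map vis := by
  apply List.Sublist.length_le
  apply List.monotone_filter_right
  intro a ha
  simp only [Bool.not_eq_true'] at *
  by_contra hc
  simp only [Bool.not_eq_false] at hc
  rw [contains_add_of hc] at ha
  exact absurd ha (by simp)

lemma keysNot_add_lt (cte_map : List (String × List String)) (vis : PySem.Set String)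
    {n : String} (hk : n ∈ (cteDict cte_map).keys)
    (hv : ¬ PySem.Set.contains vis n = true) :
    keysNot cte_map (PySem.Set.add vis n) < keysNot cte_map vis := by
  have hsub : ((cteDict cte_map).keys.filter
      (fun x => !(PySem.Set.contains (PySem.Set.add vis n) x))).Sublist
      ((cteDict cte_map).keys.filter (fun x => !(PySem.Set.contains vis x))) := by
    apply List.monotone_filter_right
    intro a ha
    simp only [Bool.not_eq_true'] at *
    by_contra hc
    simp only [Bool.not_eq_false] at hc
    rw [contains_add_of hc] at ha
    exact absurd ha (by simp)
  rcases Nat.lt_or_ge (keysNot cte_map (PySem.Set.add vis n)) (keysNot cte_map vis) with h | h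
  · exact h
  · exfalso
    have hlen : ((cteDict cte_map).keys.filter
        (fun x => !(PySem.Set.contains (PySem.Set.add vis n) x))).length =
        ((cteDict cte_map).keys.filter (fun x => !(PySem.Set.contains vis x))).length :=
      Nat.le_antisymm (List.Sublist.length_le hsub) h
    have heq := hsub.eq_of_length hlen
    have hmem : n ∈ (cteDict cte_map).keys.filter (fun x => !(PySem.Set.contains vis x)) := by
      simp only [List.mem_filter, Bool.not_eq_true']
      exact ⟨hk, by simpa using hv⟩
    rw [← heq] at hmem
    simp only [List.mem_filter, Bool.not_eq_true'] at hmem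
    exact absurd hmem.2 (by simp)

lemma mem_keys_of_deps_ne (cte_map : List (String × List String)) (n : String)
    (h : depsOf cte_map n ≠ []) : n ∈ (cteDict cte_map).keys := by
  by_contra hn
  apply h
  have hc : (cteDict cte_map).contains n = false := by
    rw [PySem.Dict.contains_eq_decide_mem_keys]
    simp [hn]
  rw [depsOf, PySem.Dict.getD_of_not_contains _ _ hc]
  rfl

def runB (cte_map : List (String × List String)) (dm : PySem.Dict String Int)
    (vis : PySem.Set String) (stack : List BFrame) (ret : Int) : PySem.Dict String Int :=
  match stack with
  | [] => dm
  | BFrame.eval n :: k =>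
    match dm.get? n with
    | some v => runB cte_map dm vis k v
    | none =>
      if _hv : PySem.Set.contains vis n then runB cte_map dm vis k 1
      else
        let vis1 := PySem.Set.add vis n
        match _hd : depsOf cte_map n with
        | [] => runB cte_map (dm.insert n 1) vis1 k 1
        | d0 :: rest =>
          runB cte_map dm vis1 (BFrame.eval d0 :: BFrame.comb n rest none :: k) ret
  | BFrame.comb n rest acc :: k =>
    let a : Int := match acc with | none => ret | some x => max x ret
    match rest with
    | [] => runB cte_map (dm.insert n (a + 1)) vis k (a + 1)
    | d0 :: rest' =>
      runB cte_map dm vis (BFrame.eval d0 :: BFrame.comb n rest' (some a) :: k) ret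
termination_by (keysNot cte_map vis, stackW stack)
decreasing_by
  · apply Prod.Lex.right; simp [stackW, frameW]
  · apply Prod.Lex.right; simp [stackW, frameW]
  · rcases Nat.lt_or_ge (keysNot cte_map (PySem.Set.add vis n)) (keysNot cte_map vis) with h | h
    · exact Prod.Lex.left _ _ h
    · have := keysNot_add_le cte_map vis n
      have heq : keysNot cte_map (PySem.Set.add vis n) = keysNot cte_map vis := by omega
      rw [heq]; apply Prod.Lex.right; simp [stackW, frameW]
  · apply Prod.Lex.left
    exact keysNot_add_lt cte_map vis (mem_keys_of_deps_ne cte_map n (by simp [_hd])) _hv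
  · apply Prod.Lex.right; simp [stackW, frameW]
  · apply Prod.Lex.right; simp [stackW, frameW]; omega

def compute_cte_depths_alt (cte_map : List (String × List String)) : List (String × Int) :=
  ((cteDict cte_map).keys.foldl
      (fun dm root => runB cte_map dm PySem.Set.empty [BFrame.eval root] 0)
      PySem.Dict.empty).items

-- ===== PRECONDITION & SPEC =====
-- (no Pre_: A is total on dict-of-list inputs, including cyclic dependency graphs)

def Spec_compute_cte_depths (cte_map : List (String × List String)) (out : List (String × Int)) : Prop := out = compute_cte_depths_alt cte_map
instance (cte_map : List (String × List String)) (out : List (String × Int)) : Decidable (Spec_compute_cte_depths cte_map out) := by unfold Spec_compute_cte_depths; infer_instance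

-- ===== CLAIM (what is proved, stated in full; the proofs are below) =====
def Claim_equal_compute_cte_depths : Prop := ∀ (cte_map : List (String × List String)), Dom_compute_cte_depths cte_map → Spec_compute_cte_depths cte_map (compute_cte_depths cte_map)

-- ===== LEMMAS AND PROOFS =====

lemma prefix_add (vis : PySem.Set String) (n : String) : vis <+: PySem.Set.add vis n := by
  simp only [PySem.Set.add]
  split
  · exact List.prefix_refl _
  · exact List.prefix_append _ _

lemma keysNot_le_of_prefix (cte_map : List (String × List String))
    {vis vis' : PySem.Set String} (h : vis <+: vis') :
    keysNot cte_map vis' ≤ keysNot cte_map vis := by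
  apply List.Sublist.length_le
  apply List.monotone_filter_right
  intro a ha
  simp only [Bool.not_eq_true'] at *
  by_contra hc
  simp only [Bool.not_eq_false] at hc
  have hmem : a ∈ vis := by simpa [PySem.Set.contains] using hc
  have hm2 : a ∈ vis' := h.sublist.subset hmem
  simp only [PySem.Set.contains] at ha
  have : a ∉ vis' := by simpa using ha
  exact this hm2

def combAcc (acc : Option Int) (ret : Int) : Int :=
  match acc with | none => ret | some x => max x ret

lemma runB_nil (cte_map : List (String × List String)) (dm : PySem.Dict String Int)
    (vis : PySem.Set String) (ret : Int) : runB cte_map dm vis [] ret = dm := by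
  rw [runB.eq_def]

lemma runB_eval_cached (cte_map : List (String × List String)) {dm : PySem.Dict String Int}
    {n : String} {v : Int} (vis : PySem.Set String) (k : List BFrame) (ret : Int)
    (hg : dm.get? n = some v) :
    runB cte_map dm vis (BFrame.eval n :: k) ret = runB cte_map dm vis k v := by
  rw [runB.eq_def]; simp [hg]

lemma runB_eval_visiting (cte_map : List (String × List String)) {dm : PySem.Dict String Int}
    {n : String} {vis : PySem.Set String} (k : List BFrame) (ret : Int)
    (hg : dm.get? n = none) (hv : n ∈ vis) :
    runB cte_map dm vis (BFrame.eval n :: k) ret = runB cte_map dm vis k 1 := by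
  rw [runB.eq_def]; simp [hg, PySem.Set.contains, hv]

lemma runB_eval_leaf (cte_map : List (String × List String)) {dm : PySem.Dict String Int}
    {n : String} {vis : PySem.Set String} (k : List BFrame) (ret : Int)
    (hg : dm.get? n = none) (hv : n ∉ vis) (hd : depsOf cte_map n = []) :
    runB cte_map dm vis (BFrame.eval n :: k) ret =
      runB cte_map (dm.insert n 1) (PySem.Set.add vis n) k 1 := by
  rw [runB.eq_def]; simp only [hg]
  rw [dif_neg (show ¬ PySem.Set.contains vis n = true by simp [PySem.Set.contains, hv])]
  split
  · rfl
  · rename_i d0 rest heq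
    rw [hd] at heq
    cases heq

lemma runB_eval_expand (cte_map : List (String × List String)) {dm : PySem.Dict String Int}
    {n d0 : String} {rest : List String} {vis : PySem.Set String} (k : List BFrame) (ret : Int)
    (hg : dm.get? n = none) (hv : n ∉ vis) (hd : depsOf cte_map n = d0 :: rest) :
    runB cte_map dm vis (BFrame.eval n :: k) ret =
      runB cte_map dm (PySem.Set.add vis n)
        (BFrame.eval d0 :: BFrame.comb n rest none :: k) ret := by
  rw [runB.eq_def]; simp only [hg]
  rw [dif_neg (show ¬ PySem.Set.contains vis n = true by simp [PySem.Set.contains, hv])]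
  split
  · rename_i heq
    rw [hd] at heq
    cases heq
  · rename_i d0' rest' heq
    rw [hd] at heq
    cases heq
    rfl

lemma runB_comb_nil (cte_map : List (String × List String)) (dm : PySem.Dict String Int)
    (vis : PySem.Set String) (n : String) (acc : Option Int) (k : List BFrame) (ret : Int) :
    runB cte_map dm vis (BFrame.comb n [] acc :: k) ret =
      runB cte_map (dm.insert n (combAcc acc ret + 1)) vis k (combAcc acc ret + 1) := by
  rw [runB.eq_def]; cases acc <;> rfl

lemma runB_comb_cons (cte_map : List (String × List String)) (dm : PySem.Dict String Int)
    (vis : PySem.Set String) (n d0 : String) (rest' : List String) (acc : Option Int)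
    (k : List BFrame) (ret : Int) :
    runB cte_map dm vis (BFrame.comb n (d0 :: rest') acc :: k) ret =
      runB cte_map dm vis
        (BFrame.eval d0 :: BFrame.comb n rest' (some (combAcc acc ret)) :: k) ret := by
  rw [runB.eq_def]; cases acc <;> rfl

lemma getDepthA_cached (cte_map : List (String × List String)) {dm : PySem.Dict String Int}
    {n : String} {v : Int} (f : Nat) (vis : PySem.Set String) (hg : dm.get? n = some v) :
    getDepthA cte_map (f + 1) n (dm, vis) = (v, dm, vis) := by
  simp [getDepthA, hg]

lemma getDepthA_visiting (cte_map : List (String × List String)) {dm : PySem.Dict String Int}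
    {n : String} {vis : PySem.Set String} (f : Nat)
    (hg : dm.get? n = none) (hv : n ∈ vis) :
    getDepthA cte_map (f + 1) n (dm, vis) = (1, dm, vis) := by
  simp [getDepthA, hg, hv]

lemma getDepthA_leaf (cte_map : List (String × List String)) {dm : PySem.Dict String Int}
    {n : String} {vis : PySem.Set String} (f : Nat)
    (hg : dm.get? n = none) (hv : n ∉ vis) (hd : depsOf cte_map n = []) :
    getDepthA cte_map (f + 1) n (dm, vis) = (1, dm.insert n 1, PySem.Set.add vis n) := by
  simp [getDepthA, hg, hv, hd]

lemma getDepthA_expand (cte_map : List (String × List String)) {dm : PySem.Dict String Int}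
    {n d0 : String} {rest : List String} {vis : PySem.Set String} (f : Nat)
    (hg : dm.get? n = none) (hv : n ∉ vis) (hd : depsOf cte_map n = d0 :: rest) :
    getDepthA cte_map (f + 1) n (dm, vis) =
      ((goDepsA cte_map f rest (getDepthA cte_map f d0 (dm, PySem.Set.add vis n))).1 + 1,
       (goDepsA cte_map f rest (getDepthA cte_map f d0 (dm, PySem.Set.add vis n))).2.1.insert n
         ((goDepsA cte_map f rest (getDepthA cte_map f d0 (dm, PySem.Set.add vis n))).1 + 1),
       (goDepsA cte_map f rest (getDepthA cte_map f d0 (dm, PySem.Set.add vis n))).2.2) := by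
  simp [getDepthA, hg, hv, hd]

lemma goDepsA_vis_prefix (cte_map : List (String × List String)) (f : Nat)
    (hG : ∀ n dm vis, vis <+: (getDepthA cte_map f n (dm, vis)).2.2) :
    ∀ (l : List String) (p : Int × PySem.Dict String Int × PySem.Set String),
      p.2.2 <+: (goDepsA cte_map f l p).2.2 := by
  intro l
  induction l with
  | nil => intro p; simp [goDepsA]
  | cons d rest ih =>
    intro p
    rw [goDepsA]
    refine List.IsPrefix.trans ?_ (ih _)
    simpa using hG d p.2.1 p.2.2

lemma getDepthA_vis_prefix (cte_map : List (String × List String)) :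
    ∀ f n dm vis, vis <+: (getDepthA cte_map f n (dm, vis)).2.2 := by
  intro f
  induction f with
  | zero => intro n dm vis; simp [getDepthA]
  | succ f ih =>
    intro n dm vis
    cases hg : dm.get? n with
    | some v => rw [getDepthA_cached cte_map f vis hg]
    | none =>
      by_cases hv : n ∈ vis
      · rw [getDepthA_visiting cte_map f hg hv]
      · cases hd : depsOf cte_map n with
        | nil =>
          rw [getDepthA_leaf cte_map f hg hv hd]
          exact prefix_add _ _
        | cons d0 rest =>
          rw [getDepthA_expand cte_map f hg hv hd]
          refine (prefix_add vis n).trans ?_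
          refine ((ih d0 dm (PySem.Set.add vis n)).trans ?_)
          exact goDepsA_vis_prefix cte_map f ih rest (getDepthA cte_map f d0 (dm, PySem.Set.add vis n))

lemma sim_main (cte_map : List (String × List String)) :
    ∀ m f n dm vis k ret, keysNot cte_map vis ≤ m → m + 1 ≤ f →
      runB cte_map dm vis (BFrame.eval n :: k) ret =
        (fun r => runB cte_map r.2.1 r.2.2 k r.1) (getDepthA cte_map f n (dm, vis)) := by
  intro m
  induction m using Nat.strong_induction_on with
  | _ m IH =>
    have simComb : ∀ m', m' < m → ∀ f, m' + 1 ≤ f →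
        ∀ (rest : List String) (acc : Option Int) ret dm vis n k,
          keysNot cte_map vis ≤ m' →
          runB cte_map dm vis (BFrame.comb n rest acc :: k) ret =
            (fun r => runB cte_map (r.2.1.insert n (r.1 + 1)) r.2.2 k (r.1 + 1))
              (goDepsA cte_map f rest (combAcc acc ret, dm, vis)) := by
      intro m' hm' f hf rest
      induction rest with
      | nil =>
        intro acc ret dm vis n k _
        rw [runB_comb_nil]
        simp [goDepsA]
      | cons d0 rest' ihr =>
        intro acc ret dm vis n k hk
        rw [runB_comb_cons]
        rw [IH m' hm' f d0 dm vis
              (BFrame.comb n rest' (some (combAcc acc ret)) :: k) ret hk hf]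
        dsimp only
        have hpre : vis <+: (getDepthA cte_map f d0 (dm, vis)).2.2 :=
          getDepthA_vis_prefix cte_map f d0 dm vis
        rw [ihr (some (combAcc acc ret))
              (getDepthA cte_map f d0 (dm, vis)).1
              (getDepthA cte_map f d0 (dm, vis)).2.1
              (getDepthA cte_map f d0 (dm, vis)).2.2 n k
              (le_trans (keysNot_le_of_prefix cte_map hpre) hk)]
        rw [goDepsA]
        rfl
    intro f n dm vis k ret hk hf
    obtain ⟨f', rfl⟩ : ∃ f', f = f' + 1 := ⟨f - 1, by omega⟩
    cases hg : dm.get? n with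
    | some v =>
      rw [runB_eval_cached cte_map vis k ret hg, getDepthA_cached cte_map f' vis hg]
    | none =>
      by_cases hv : n ∈ vis
      · rw [runB_eval_visiting cte_map k ret hg hv, getDepthA_visiting cte_map f' hg hv]
      · cases hd : depsOf cte_map n with
        | nil =>
          rw [runB_eval_leaf cte_map k ret hg hv hd, getDepthA_leaf cte_map f' hg hv hd]
        | cons d0 rest =>
          have hnk : n ∈ (cteDict cte_map).keys :=
            mem_keys_of_deps_ne cte_map n (by simp [hd])
          have h1 : keysNot cte_map (PySem.Set.add vis n) < keysNot cte_map vis :=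
            keysNot_add_lt cte_map vis hnk (by simpa [PySem.Set.contains] using hv)
          rw [runB_eval_expand cte_map k ret hg hv hd]
          rw [IH (m - 1) (by omega) f' d0 dm (PySem.Set.add vis n)
                (BFrame.comb n rest none :: k) ret (by omega) (by omega)]
          dsimp only
          have hpre : PySem.Set.add vis n <+:
              (getDepthA cte_map f' d0 (dm, PySem.Set.add vis n)).2.2 :=
            getDepthA_vis_prefix cte_map f' d0 dm (PySem.Set.add vis n)
          rw [simComb (m - 1) (by omega) f' (by omega) rest none
                (getDepthA cte_map f' d0 (dm, PySem.Set.add vis n)).1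
                (getDepthA cte_map f' d0 (dm, PySem.Set.add vis n)).2.1
                (getDepthA cte_map f' d0 (dm, PySem.Set.add vis n)).2.2 n k
                (le_trans (keysNot_le_of_prefix cte_map hpre) (by omega))]
          rw [getDepthA_expand cte_map f' hg hv hd]
          rfl

lemma keysNot_empty (cte_map : List (String × List String)) :
    keysNot cte_map PySem.Set.empty = (cteDict cte_map).size := by
  simp [keysNot, PySem.Set.contains, PySem.Set.empty, PySem.Dict.keys, PySem.Dict.size]

-- ===== VERDICT (by name: the statement is the Claim_ definition above) =====
theorem compute_cte_depths_spec : Claim_equal_compute_cte_depths := by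
  unfold Claim_equal_compute_cte_depths
  intro cte_map _
  unfold Spec_compute_cte_depths compute_cte_depths compute_cte_depths_alt
  congr 1
  apply PySem.List.foldl_congr_mem
  intro dm n _
  have h := sim_main cte_map ((cteDict cte_map).size) ((cteDict cte_map).size + 1) n dm
      PySem.Set.empty [] 0 (by rw [keysNot_empty]) (le_refl _)
  rw [h]
  dsimp only
  rw [runB_nil]
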